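-- pv_equiv track=rewrite | github.com/petersaalbrink/apollo | address_checker/Address_Parsers/address_parser.py | drop_triplicate_letters
-- ===== SOURCE A (Python) =====
-- def drop_triplicate_letters(oldstring):
--     try:
--         newstring = oldstring[0]
--         for char in oldstring[1:]:
--             try:
--                 if char == newstring[-1] and char == newstring[-2] and char == newstring[-3] and char.isalpha():
--                     pass
--                 else:
--                     newstring += char
--             except:
--                 newstring += char
--                 pass
--         return newstring
--     except:
--         return oldstring
-- ===== SOURCE B (Python) =====
-- def drop_triplicate_letters(oldstring):
--     # Walk maximal runs of equal characters; cap alphabetic runs at 3.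
--     parts = []
--     i, n = 0, len(oldstring)
--     while i < n:
--         c = oldstring[i]
--         j = i
--         while j < n and oldstring[j] == c:
--             j += 1
--         cnt = j - i
--         parts.append(c * (min(cnt, 3) if c.isalpha() else cnt))
--         i = j
--     return ''.join(parts)
-- ===== Notes on version B (the rewrite author's own statement) =====
-- stated objective: simpler
-- what changed: Replaces the char-by-char loop with try/except-guarded negative indexing into the growing output by a single run-scan that emits each maximal run capped at 3 for alphabetic characters.
import Mathlib
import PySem

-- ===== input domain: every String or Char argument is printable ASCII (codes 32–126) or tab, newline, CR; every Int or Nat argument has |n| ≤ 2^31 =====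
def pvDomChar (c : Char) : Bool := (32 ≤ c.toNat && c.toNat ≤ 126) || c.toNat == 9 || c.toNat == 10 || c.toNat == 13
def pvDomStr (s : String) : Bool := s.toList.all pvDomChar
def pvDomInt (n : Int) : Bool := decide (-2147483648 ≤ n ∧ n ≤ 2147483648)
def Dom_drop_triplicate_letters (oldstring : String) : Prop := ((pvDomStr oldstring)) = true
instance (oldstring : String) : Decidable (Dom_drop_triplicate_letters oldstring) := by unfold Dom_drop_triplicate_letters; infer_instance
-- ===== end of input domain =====

-- B replaces A's char-by-char loop (with try/except negative indexing into the growing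
-- output) by a single scan over maximal runs, capping alphabetic runs at 3 (objective: simpler).

-- ===== PORT A =====
-- the loop body: the inner try's IndexError (newstring[-2]/[-3] out of range) is exactly
-- pyGet? = none, and the except branch appends — so skip iff all three gets equal char and isalpha
def pvStepA (acc : List Char) (ch : Char) : List Char :=
  if (PySem.List.pyGet? acc (-1) == some ch) &&
     (PySem.List.pyGet? acc (-2) == some ch) &&
     (PySem.List.pyGet? acc (-3) == some ch) &&
     PySem.Chars.isalpha ch then acc else acc ++ [ch]

def drop_triplicate_letters (oldstring : String) : String :=
  match oldstring.toList with
  | [] => oldstring  -- oldstring[0] raises IndexError; outer except returns oldstring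
  | c0 :: rest => String.ofList (rest.foldl pvStepA [c0])

-- ===== PORT B =====
-- Source B's run scanner: the inner while loop counting the run is takeWhile/dropWhile
def pvRuns (l : List Char) : List Char :=
  match l with
  | [] => []
  | c :: rest =>
    let cnt := 1 + (rest.takeWhile (fun x => x == c)).length
    let keep := if PySem.Chars.isalpha c then min cnt 3 else cnt
    List.replicate keep c ++ pvRuns (rest.dropWhile (fun x => x == c))
termination_by l.length
decreasing_by
  simp only [List.length_cons]
  exact Nat.lt_succ_of_le (List.length_dropWhile_le _ _)

def drop_triplicate_letters_alt (oldstring : String) : String :=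
  String.ofList (pvRuns oldstring.toList)

-- ===== PRECONDITION & SPEC =====
def Spec_drop_triplicate_letters (oldstring : String) (out : String) : Prop := out = drop_triplicate_letters_alt oldstring
instance (oldstring : String) (out : String) : Decidable (Spec_drop_triplicate_letters oldstring out) := by unfold Spec_drop_triplicate_letters; infer_instance

-- ===== CLAIM (what is proved, stated in full; the proofs are below) =====
def Claim_equal_drop_triplicate_letters : Prop := ∀ (oldstring : String), Dom_drop_triplicate_letters oldstring → Spec_drop_triplicate_letters oldstring (drop_triplicate_letters oldstring)

-- ===== LEMMAS AND PROOFS =====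

theorem pvRuns_nil : pvRuns [] = [] := by rw [pvRuns]

theorem pvRuns_cons (c : Char) (rest : List Char) :
    pvRuns (c :: rest) =
      List.replicate (if PySem.Chars.isalpha c then
          min (1 + (rest.takeWhile (fun x => x == c)).length) 3
        else 1 + (rest.takeWhile (fun x => x == c)).length) c ++
        pvRuns (rest.dropWhile (fun x => x == c)) := by
  rw [pvRuns]

theorem pvGet2 (xs : List Char) (a b : Char) : PySem.List.pyGet? (xs ++ [a, b]) (-2) = some a := by
  rw [PySem.List.pyGet?_neg_ofNat (xs ++ [a, b]) 2 (by omega) (by simp)]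
  simp

theorem pvGet3 (xs : List Char) (a b c : Char) :
    PySem.List.pyGet? (xs ++ [a, b, c]) (-3) = some a := by
  rw [PySem.List.pyGet?_neg_ofNat (xs ++ [a, b, c]) 3 (by omega) (by simp)]
  simp

-- what A's step does on an accumulator ending in exactly r copies of c (last of p ≠ c)
theorem pvStepA_run (p : List Char) (c : Char) (r : Nat) (hr : 1 ≤ r)
    (hp : ∀ d, p.getLast? = some d → d ≠ c) (ch : Char) :
    pvStepA (p ++ List.replicate r c) ch =
      if ch = c ∧ 3 ≤ r ∧ PySem.Chars.isalpha c then p ++ List.replicate r c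
      else (p ++ List.replicate r c) ++ [ch] := by
  have hlast : PySem.List.pyGet? (p ++ List.replicate r c) (-1) = some c := by
    rw [PySem.List.pyGet?_neg_one]
    rcases Nat.exists_eq_add_of_le hr with ⟨k, hk⟩
    subst hk
    rw [show (1 + k) = k + 1 from by omega, List.replicate_succ']
    simp [← List.append_assoc]
  by_cases hch : ch = c
  · subst hch
    rcases Nat.lt_or_ge r 3 with h3 | h3
    · -- r = 1 or r = 2 : a deeper negative index misses ch, so A appends
      have hcond : PySem.List.pyGet? (p ++ List.replicate r ch) (-2) = some ch →
          PySem.List.pyGet? (p ++ List.replicate r ch) (-3) ≠ some ch := by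
        intro h2 h3'
        interval_cases r
        · -- r = 1 : acc[-2] is p's last element (or IndexError), never ch
          rcases List.eq_nil_or_concat p with hp0 | ⟨q, d, hq⟩
          · subst hp0
            simp [PySem.List.pyGet?, PySem.List.pyIdx?, List.replicate] at h2
          · subst hq
            rw [show q.concat d ++ List.replicate 1 ch = q ++ [d, ch] from by
              simp [List.replicate], pvGet2] at h2
            exact hp d (by simp) (by simpa using h2)
        · -- r = 2 : acc[-3] is p's last element (or IndexError), never ch
          rcases List.eq_nil_or_concat p with hp0 | ⟨q, d, hq⟩
          · subst hp0
            simp [PySem.List.pyGet?, PySem.List.pyIdx?, List.replicate] at h3'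
          · subst hq
            rw [show q.concat d ++ List.replicate 2 ch = q ++ [d, ch, ch] from by
              simp [List.replicate], pvGet3] at h3'
            exact hp d (by simp) (by simpa using h3')
      unfold pvStepA
      rw [if_neg, if_neg (by rintro ⟨-, h, -⟩; omega)]
      simp only [Bool.and_eq_true, beq_iff_eq]
      rintro ⟨⟨⟨-, h2⟩, h3'⟩, -⟩
      exact hcond h2 h3'
    · -- r ≥ 3 : the last three characters of the accumulator are all ch
      rcases Nat.exists_eq_add_of_le h3 with ⟨k, hk⟩
      have hdec : p ++ List.replicate r ch = (p ++ List.replicate k ch) ++ [ch, ch, ch] := by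
        subst hk
        rw [show (3 + k) = k + 3 from by omega, List.replicate_add, ← List.append_assoc]
        rfl
      have h2 : PySem.List.pyGet? (p ++ List.replicate r ch) (-2) = some ch := by
        rw [hdec, show (p ++ List.replicate k ch) ++ [ch, ch, ch] =
          ((p ++ List.replicate k ch) ++ [ch]) ++ [ch, ch] from by simp, pvGet2]
      have h3' : PySem.List.pyGet? (p ++ List.replicate r ch) (-3) = some ch := by
        rw [hdec, pvGet3]
      by_cases ha : PySem.Chars.isalpha ch
      · unfold pvStepA
        rw [if_pos (by simp [hlast, h2, h3', ha]), if_pos ⟨rfl, h3, ha⟩]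
      · unfold pvStepA
        rw [if_neg (by simp [ha]), if_neg (fun h => ha h.2.2)]
  · -- ch ≠ c : the first comparison already fails, A appends
    unfold pvStepA
    rw [if_neg, if_neg (fun h => hch h.1)]
    simp only [Bool.and_eq_true, beq_iff_eq]
    rintro ⟨⟨⟨h1, -⟩, -⟩, -⟩
    rw [hlast] at h1
    exact hch (Option.some.inj h1).symm

-- the main invariant: folding A's step over l from an accumulator ending in a run of r c's
theorem pvFold_run (l : List Char) : ∀ (p : List Char) (c : Char) (r : Nat),
    1 ≤ r → (∀ d, p.getLast? = some d → d ≠ c) →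
    (PySem.Chars.isalpha c = true → r ≤ 3) →
    List.foldl pvStepA (p ++ List.replicate r c) l =
      p ++ List.replicate (if PySem.Chars.isalpha c then
              min (r + (l.takeWhile (fun x => x == c)).length) 3
            else r + (l.takeWhile (fun x => x == c)).length) c
        ++ pvRuns (l.dropWhile (fun x => x == c)) := by
  induction l with
  | nil =>
    intro p c r hr hp hle
    simp only [List.takeWhile_nil, List.dropWhile_nil, List.length_nil, Nat.add_zero,
      pvRuns_nil, List.foldl_nil, List.append_nil]
    split_ifs with ha
    · rw [Nat.min_eq_left (hle ha)]
    · rfl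
  | cons ch t ih =>
    intro p c r hr hp hle
    rw [List.foldl_cons, pvStepA_run p c r hr hp ch]
    by_cases hch : ch = c
    · subst hch
      simp only [List.takeWhile_cons, List.dropWhile_cons, beq_self_eq_true, if_true,
        List.length_cons]
      by_cases ha : PySem.Chars.isalpha ch
      · by_cases h3 : 3 ≤ r
        · have hr3 : r = 3 := by have := hle ha; omega
          subst hr3
          rw [if_pos (by simp [ha]), ih p ch 3 (by omega) hp hle]
          simp only [ha, if_true]
          have he : min (3 + (t.takeWhile (fun x => x == ch)).length) 3 =
              min (3 + ((t.takeWhile (fun x => x == ch)).length + 1)) 3 := by omega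
          rw [he]
        · rw [if_neg (by tauto), List.append_assoc, ← List.replicate_succ',
            ih p ch (r + 1) (by omega) hp (fun _ => by omega)]
          simp only [ha, if_true]
          have he : min (r + 1 + (t.takeWhile (fun x => x == ch)).length) 3 =
              min (r + ((t.takeWhile (fun x => x == ch)).length + 1)) 3 := by omega
          rw [he]
      · rw [if_neg (by tauto), List.append_assoc, ← List.replicate_succ',
          ih p ch (r + 1) (by omega) hp (fun h => absurd h ha)]
        simp only [ha]
        have he : r + 1 + (t.takeWhile (fun x => x == ch)).length =
            r + ((t.takeWhile (fun x => x == ch)).length + 1) := by omega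
        rw [he]
    · rw [if_neg (by tauto)]
      have hlast : ∀ d, (p ++ List.replicate r c).getLast? = some d → d ≠ ch := by
        intro d hd
        rcases Nat.exists_eq_add_of_le hr with ⟨k, hk⟩
        subst hk
        rw [show (1 + k) = k + 1 from by omega, List.replicate_succ', ← List.append_assoc] at hd
        simp at hd
        subst hd
        exact fun h => hch h.symm
      rw [show (p ++ List.replicate r c) ++ [ch] =
          (p ++ List.replicate r c) ++ List.replicate 1 ch from by simp [List.replicate],
        ih (p ++ List.replicate r c) ch 1 (by omega) hlast (fun _ => by omega)]
      have hb : (ch == c) = false := by simp [hch]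
      simp only [List.takeWhile_cons, List.dropWhile_cons, hb, Bool.false_eq_true, if_false,
        List.length_nil, Nat.add_zero]
      rw [pvRuns_cons, List.append_assoc,
        show (if PySem.Chars.isalpha c = true then min r 3 else r) = r from by
          split_ifs with ha
          exacts [Nat.min_eq_left (hle ha), rfl]]

-- ===== VERDICT (by name: the statement is the Claim_ definition above) =====
theorem drop_triplicate_letters_spec : Claim_equal_drop_triplicate_letters := by
  intro s _
  unfold Spec_drop_triplicate_letters drop_triplicate_letters drop_triplicate_letters_alt
  cases h : s.toList with
  | nil =>
    have hs : s = "" := by have := congrArg String.ofList h; simpa using this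
    subst hs
    rw [pvRuns_nil]
  | cons c0 rest =>
    show String.ofList (rest.foldl pvStepA [c0]) = String.ofList (pvRuns (c0 :: rest))
    rw [show [c0] = ([] : List Char) ++ List.replicate 1 c0 from by simp [List.replicate],
      pvFold_run rest [] c0 1 (by omega) (by simp) (fun _ => by omega), pvRuns_cons]
    rw [List.nil_append]
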